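-- pv_equiv track=rewrite | github.com/justinaxelberg-coder/inep-compare | convergence/reliability_rules.py | classify_author_strength
-- ===== SOURCE A (Python) =====
-- AUTHOR_GOLD = "orcid"
--
-- AUTHOR_INTERNAL = "internal_id"
--
-- AUTHOR_WEAK = "string"
--
-- AUTHOR_NONE = "none"
--
-- def classify_author_strength(work: dict) -> str:
--     for author in work.get("authors") or []:
--         if author.get("orcid"):
--             return AUTHOR_GOLD
--     for author in work.get("authors") or []:
--         if author.get("author_id"):
--             return AUTHOR_INTERNAL
--     for author in work.get("authors") or []:
--         if author.get("name"):
--             return AUTHOR_WEAK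
--     return AUTHOR_NONE
-- ===== SOURCE B (Python) =====
-- AUTHOR_GOLD = "orcid"
-- AUTHOR_INTERNAL = "internal_id"
-- AUTHOR_WEAK = "string"
-- AUTHOR_NONE = "none"
--
-- def classify_author_strength(work: dict) -> str:
--     seen_internal = False
--     seen_weak = False
--     for author in work.get("authors") or []:
--         if author.get("orcid"):
--             return AUTHOR_GOLD
--         if author.get("author_id"):
--             seen_internal = True
--         if author.get("name"):
--             seen_weak = True
--     if seen_internal:
--         return AUTHOR_INTERNAL
--     if seen_weak:
--         return AUTHOR_WEAK
--     return AUTHOR_NONE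
-- ===== Notes on version B (the rewrite author's own statement) =====
-- stated objective: alternative
-- what changed: Replaces A's three sequential scans of the author list with a single pass that returns on the first orcid and records internal/weak flags, committed only after the loop to preserve priority.
import Mathlib
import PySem

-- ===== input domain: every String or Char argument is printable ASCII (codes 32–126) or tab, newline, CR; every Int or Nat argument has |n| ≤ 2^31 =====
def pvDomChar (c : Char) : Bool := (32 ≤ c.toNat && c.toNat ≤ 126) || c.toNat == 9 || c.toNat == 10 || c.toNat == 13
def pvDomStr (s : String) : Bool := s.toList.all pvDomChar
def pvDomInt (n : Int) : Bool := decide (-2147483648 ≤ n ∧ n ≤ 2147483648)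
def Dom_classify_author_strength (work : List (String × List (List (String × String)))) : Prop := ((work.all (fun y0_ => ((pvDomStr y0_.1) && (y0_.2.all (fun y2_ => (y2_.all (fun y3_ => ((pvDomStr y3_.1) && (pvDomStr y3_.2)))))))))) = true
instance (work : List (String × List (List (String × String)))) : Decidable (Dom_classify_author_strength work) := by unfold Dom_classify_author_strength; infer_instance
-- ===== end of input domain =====

-- B replaces A's three sequential scans with one pass (flags committed after the loop, preserving orcid priority); objective: alternative.
-- ===== PORT A =====
-- shared helper: Python dict lookup on an assoc list (first match), truthiness of the string value
-- exact: 'd.get(k)' is the first pair with key k; a str is truthy iff nonempty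
def pvTruthyGet (author : List (String × String)) (k : String) : Bool :=
  match author.find? (fun p => p.1 == k) with
  | some p => p.2 != ""
  | none => false

-- 'work.get("authors") or []' : the value if present (an empty list is falsy but 'or []' yields [] anyway), else []
def pvAuthors (work : List (String × List (List (String × String)))) : List (List (String × String)) :=
  match work.find? (fun p => p.1 == "authors") with
  | some p => p.2
  | none => []

def classify_author_strength (work : List (String × List (List (String × String)))) : String :=
  if (pvAuthors work).any (fun a => pvTruthyGet a "orcid") then "orcid"
  else if (pvAuthors work).any (fun a => pvTruthyGet a "author_id") then "internal_id"
  else if (pvAuthors work).any (fun a => pvTruthyGet a "name") then "string"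
  else "none"

-- ===== PORT B =====
def altLoop : List (List (String × String)) → Bool → Bool → String
  | [], seenInternal, seenWeak =>
      if seenInternal then "internal_id" else if seenWeak then "string" else "none"
  | a :: rest, seenInternal, seenWeak =>
      if pvTruthyGet a "orcid" then "orcid"
      else altLoop rest (seenInternal || pvTruthyGet a "author_id") (seenWeak || pvTruthyGet a "name")

def classify_author_strength_alt (work : List (String × List (List (String × String)))) : String :=
  altLoop (pvAuthors work) false false

-- ===== PRECONDITION & SPEC =====
def Spec_classify_author_strength (work : List (String × List (List (String × String)))) (out : String) : Prop := out = classify_author_strength_alt work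
instance (work : List (String × List (List (String × String)))) (out : String) : Decidable (Spec_classify_author_strength work out) := by unfold Spec_classify_author_strength; infer_instance

-- ===== CLAIM (what is proved, stated in full; the proofs are below) =====
def Claim_equal_classify_author_strength : Prop := ∀ (work : List (String × List (List (String × String)))), Dom_classify_author_strength work → Spec_classify_author_strength work (classify_author_strength work)

-- ===== LEMMAS AND PROOFS =====
theorem altLoop_eq (l : List (List (String × String))) :
    ∀ si sw : Bool, altLoop l si sw =
      if l.any (fun a => pvTruthyGet a "orcid") then "orcid"
      else if si || l.any (fun a => pvTruthyGet a "author_id") then "internal_id"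
      else if sw || l.any (fun a => pvTruthyGet a "name") then "string"
      else "none" := by
  induction l with
  | nil => intro si sw; simp [altLoop]
  | cons a rest ih =>
    intro si sw
    by_cases ho : pvTruthyGet a "orcid" = true
    · simp [altLoop, ho]
    · simp only [altLoop, ho, List.any_cons, Bool.false_or,
        Bool.or_eq_true, ih, Bool.or_assoc]
      simp

-- ===== VERDICT (by name: the statement is the Claim_ definition above) =====
theorem classify_author_strength_spec : Claim_equal_classify_author_strength := by
  intro work _
  unfold Spec_classify_author_strength classify_author_strength classify_author_strength_alt
  rw [altLoop_eq]
  simp
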